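-- pv_equiv track=rewrite | github.com/mdorier/Benchmarks | Pilot3/P3B4/data_handler.py | get_token_count
-- ===== SOURCE A (Python) =====
-- from collections import Counter, OrderedDict
--
-- def get_token_count(tokenlist):
--     """
--     function to read training data token token list
--     args:
--         tokenlist: list of documents as sequence of tokens
--     returns:
--         vocab: counter of document token occurances as ordered dict
--     """
--     vocab = OrderedDict()
--     #set CV list indicies
--
--     for i, tokens in enumerate(tokenlist):
--         vocabCounter = dict(Counter(tokens))
--         for this_token in vocabCounter.keys():
--             try: vocab[this_token] += 1
--             except KeyError: vocab[this_token] = 1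
--     return vocab
-- ===== SOURCE B (Python) =====
-- from collections import OrderedDict
--
-- def get_token_count(tokenlist):
--     # vocabulary-first: enumerate distinct tokens in first-appearance order,
--     # then compute each token's document frequency by scanning the document sets
--     docsets = [set(doc) for doc in tokenlist]
--     vocab_order = dict.fromkeys(t for doc in tokenlist for t in doc)
--     return OrderedDict((t, sum(1 for s in docsets if t in s)) for t in vocab_order)
-- ===== Notes on version B (the rewrite author's own statement) =====
-- stated objective: alternative
-- what changed: Instead of A's single pass that dedupes each document and increments a running dict, B first enumerates the distinct vocabulary in first-appearance order and then computes each token's document frequency by testing membership against precomputed per-document sets.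
import Mathlib
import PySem

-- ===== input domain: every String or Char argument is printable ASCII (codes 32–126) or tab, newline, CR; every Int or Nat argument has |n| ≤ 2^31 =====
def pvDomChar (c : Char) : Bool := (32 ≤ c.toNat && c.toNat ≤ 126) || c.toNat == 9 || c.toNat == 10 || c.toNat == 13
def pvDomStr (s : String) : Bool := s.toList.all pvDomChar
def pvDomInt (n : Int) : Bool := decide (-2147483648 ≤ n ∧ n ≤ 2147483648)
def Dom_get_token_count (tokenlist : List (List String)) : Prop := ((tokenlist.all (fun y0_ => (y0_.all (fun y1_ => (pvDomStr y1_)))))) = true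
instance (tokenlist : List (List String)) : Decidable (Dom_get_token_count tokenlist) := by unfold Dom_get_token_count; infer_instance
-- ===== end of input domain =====

-- B replaces A's incremental dedupe-and-increment dict with a vocabulary-first scheme: list the
-- distinct tokens once, then compute each token's document frequency by membership over the
-- per-document sets (objective: alternative decomposition, not faster).

-- ===== PORT A =====
def get_token_count (tokenlist : List (List String)) : List (String × Int) :=
  (tokenlist.foldl
    (fun vocab tokens =>
      ((PySem.Dict.counter tokens).keys).foldl
        (fun v t => v.modify t 0 (· + 1)) vocab)
    PySem.Dict.empty).items

-- ===== PORT B =====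
def get_token_count_alt (tokenlist : List (List String)) : List (String × Int) :=
  let docsets := tokenlist.map (fun doc => PySem.Set.ofList doc)
  (PySem.List.dedup (tokenlist.flatMap (fun doc => doc))).map
    (fun t => (t, docsets.foldl (fun acc s => acc + (if PySem.Set.contains s t then 1 else 0)) 0))

-- ===== PRECONDITION & SPEC =====
def Spec_get_token_count (tokenlist : List (List String)) (out : List (String × Int)) : Prop := out = get_token_count_alt tokenlist
instance (tokenlist : List (List String)) (out : List (String × Int)) : Decidable (Spec_get_token_count tokenlist out) := by unfold Spec_get_token_count; infer_instance

-- ===== CLAIM (what is proved, stated in full; the proofs are below) =====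
def Claim_equal_get_token_count : Prop := ∀ (tokenlist : List (List String)), Dom_get_token_count tokenlist → Spec_get_token_count tokenlist (get_token_count tokenlist)

-- ===== LEMMAS AND PROOFS =====

-- folding a loop body over a flatMap is folding document by document
lemma foldl_flatMap_docs (tl : List (List String)) (d : PySem.Dict String Int) :
    tl.foldl (fun v tokens => (PySem.List.dedup tokens).foldl (fun v t => v.modify t 0 (· + 1)) v) d
      = (tl.flatMap PySem.List.dedup).foldl (fun v t => v.modify t 0 (· + 1)) d := by
  induction tl generalizing d with
  | nil => rfl
  | cons t ts ih => rw [List.foldl_cons, List.flatMap_cons, List.foldl_append, ih]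

lemma update_dedup (s : PySem.Set String) (xs : List String) :
    PySem.Set.update s (PySem.List.dedup xs) = PySem.Set.update s xs := by
  rw [PySem.Set.update_eq_append_filter, PySem.Set.update_eq_append_filter]
  simp [PySem.Set.ofList_ofList]

lemma ofList_flatMap_dedup (tl : List (List String)) :
    PySem.Set.ofList (tl.flatMap PySem.List.dedup) = PySem.List.dedup (tl.flatMap (fun doc => doc)) := by
  simp only [PySem.List.dedup_eq_ofList]
  suffices h : ∀ s : PySem.Set String,
      PySem.Set.update s (tl.flatMap PySem.List.dedup) = PySem.Set.update s (tl.flatMap (fun doc => doc)) by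
    have := h PySem.Set.empty
    simpa [PySem.Set.update_empty] using this
  induction tl with
  | nil => intro s; rfl
  | cons t ts ih =>
    intro s
    simp only [List.flatMap_cons, PySem.Set.update_append, update_dedup, ih]

lemma count_flatMap_dedup (tl : List (List String)) (k : String) :
    ((tl.flatMap PySem.List.dedup).count k : Int)
      = (tl.map (fun d => if PySem.Set.contains (PySem.Set.ofList d) k then (1 : Int) else 0)).sum := by
  induction tl with
  | nil => simp
  | cons t ts ih =>
    rw [List.flatMap_cons, List.count_append, Nat.cast_add, ih, List.map_cons, List.sum_cons]
    congr 1
    by_cases h : k ∈ t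
    · rw [if_pos (by simpa [PySem.Set.contains_iff, PySem.Set.mem_ofList] using h),
        List.count_eq_one_of_mem (PySem.List.nodup_dedup t) ((PySem.List.mem_dedup _ _).mpr h)]
      norm_num
    · rw [if_neg (by simpa [PySem.Set.contains_iff, PySem.Set.mem_ofList] using h),
        List.count_eq_zero.mpr (fun hm => h ((PySem.List.mem_dedup _ _).mp hm))]
      norm_num

-- ===== VERDICT (by name: the statement is the Claim_ definition above) =====
theorem get_token_count_spec : Claim_equal_get_token_count := by
  intro tl _
  unfold Spec_get_token_count get_token_count get_token_count_alt
  have hA : (tl.foldl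
      (fun vocab tokens =>
        ((PySem.Dict.counter tokens).keys).foldl (fun v t => v.modify t 0 (· + 1)) vocab)
      PySem.Dict.empty)
      = PySem.Dict.counter (tl.flatMap PySem.List.dedup) := by
    rw [PySem.Dict.counter_eq_foldl, ← foldl_flatMap_docs]
    simp [PySem.Dict.keys_counter]
  rw [hA, PySem.Dict.items_counter, ofList_flatMap_dedup]
  apply List.map_congr_left
  intro k _
  rw [PySem.List.foldl_add (g := fun s => if PySem.Set.contains s k then (1 : Int) else 0)]
  simp [count_flatMap_dedup, List.map_map, Function.comp_def, PySem.Set.mem_ofList]
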